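-- pv_equiv track=rewrite | github.com/wooseungw/panollava | src/cora/training/losses.py | _infer_hw
-- ===== SOURCE A (Python) =====
-- import math
-- from typing import Dict, Optional, Tuple
--
-- def _infer_hw(num_patches: int) -> Tuple[int, int]:
--     """Infer (H, W) grid from total patch count; assumes ~square layout."""
--     h = w = int(math.isqrt(num_patches))
--     while h * w < num_patches:
--         if h <= w:
--             h += 1
--         else:
--             w += 1
--     return h, w
-- ===== SOURCE B (Python) =====
-- import math
--
-- def _infer_hw(num_patches):
--     """Closed-form: s = isqrt(n) gives s*s <= n < (s+1)^2, so the grid is one of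
--     (s,s), (s+1,s), (s+1,s+1), checked in that order."""
--     s = math.isqrt(num_patches)
--     if s * s == num_patches:
--         return (s, s)
--     if s * (s + 1) >= num_patches:
--         return (s + 1, s)
--     return (s + 1, s + 1)
-- ===== Notes on version B (the rewrite author's own statement) =====
-- stated objective: simpler
-- what changed: Replaces the incremental while-loop with a closed-form three-case comparison on s = isqrt(n), using the invariant s^2 <= n < (s+1)^2.
import Mathlib
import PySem

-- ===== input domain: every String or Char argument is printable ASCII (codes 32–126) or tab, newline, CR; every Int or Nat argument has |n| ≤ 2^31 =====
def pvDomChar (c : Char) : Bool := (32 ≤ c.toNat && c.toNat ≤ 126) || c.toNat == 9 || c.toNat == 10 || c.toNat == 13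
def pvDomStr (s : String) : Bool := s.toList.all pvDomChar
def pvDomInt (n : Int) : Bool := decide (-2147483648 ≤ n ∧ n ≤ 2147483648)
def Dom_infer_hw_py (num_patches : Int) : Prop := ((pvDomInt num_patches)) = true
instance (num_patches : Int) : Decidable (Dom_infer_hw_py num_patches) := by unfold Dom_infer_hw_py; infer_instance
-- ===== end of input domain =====

-- ===== PORT A =====
-- fuel bounds the while-loop; num_patches.toNat + 2 iterations always suffice since
-- h*w reaches num_patches within two steps from isqrt (fuel is a totality guard only)
def inferLoopA : Nat → Int → Int → Int → Int × Int
  | 0, _, h, w => (h, w)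
  | fuel + 1, n, h, w =>
    if h * w < n then
      (if h ≤ w then inferLoopA fuel n (h + 1) w else inferLoopA fuel n h (w + 1))
    else (h, w)

def infer_hw_py (num_patches : Int) : Int × Int :=
  let s : Int := (Nat.sqrt num_patches.toNat : Int)
  inferLoopA (num_patches.toNat + 2) num_patches s s

-- ===== PORT B =====
def infer_hw_py_alt (num_patches : Int) : Int × Int :=
  let s : Int := (Nat.sqrt num_patches.toNat : Int)
  if s * s = num_patches then (s, s)
  else if s * (s + 1) ≥ num_patches then (s + 1, s)
  else (s + 1, s + 1)

-- ===== PRECONDITION & SPEC =====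
-- math.isqrt raises ValueError on negative input, so Pre_ admits only nonnegative num_patches
def Pre_infer_hw_py (num_patches : Int) : Prop := 0 ≤ num_patches
instance (num_patches : Int) : Decidable (Pre_infer_hw_py num_patches) := by unfold Pre_infer_hw_py; infer_instance
def pvWitness_infer_hw_py : Int := 7
def Spec_infer_hw_py (num_patches : Int) (out : Int × Int) : Prop := out = infer_hw_py_alt num_patches
instance (num_patches : Int) (out : Int × Int) : Decidable (Spec_infer_hw_py num_patches out) := by unfold Spec_infer_hw_py; infer_instance

-- ===== CLAIM (what is proved, stated in full; the proofs are below) =====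
def Claim_equal_infer_hw_py : Prop := ∀ (num_patches : Int), Dom_infer_hw_py num_patches → Pre_infer_hw_py num_patches → Spec_infer_hw_py num_patches (infer_hw_py num_patches)

-- ===== LEMMAS AND PROOFS =====

-- ===== VERDICT (by name: the statement is the Claim_ definition above) =====
theorem infer_hw_py_spec : Claim_equal_infer_hw_py := by
  intro n hdom hpre
  unfold Spec_infer_hw_py infer_hw_py infer_hw_py_alt
  have hnn : ((n.toNat : Int)) = n := Int.toNat_of_nonneg hpre
  have hs1 : (Nat.sqrt n.toNat : Int) * (Nat.sqrt n.toNat : Int) ≤ n := by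
    have h : ((Nat.sqrt n.toNat * Nat.sqrt n.toNat : Nat) : Int) ≤ ((n.toNat : Nat) : Int) :=
      Int.ofNat_le.mpr (Nat.sqrt_le n.toNat)
    push_cast at h
    rw [hnn] at h
    exact h
  have hs2 : n < ((Nat.sqrt n.toNat : Int) + 1) * ((Nat.sqrt n.toNat : Int) + 1) := by
    have h : ((n.toNat : Nat) : Int) < ((Nat.succ (Nat.sqrt n.toNat) * Nat.succ (Nat.sqrt n.toNat) : Nat) : Int) :=
      Int.ofNat_lt.mpr (Nat.lt_succ_sqrt n.toNat)
    push_cast at h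
    rw [hnn] at h
    exact h
  set s : Int := (Nat.sqrt n.toNat : Int) with hsdef
  simp only [inferLoopA]
  by_cases h0 : s * s < n
  · rw [if_pos h0, if_pos (le_refl s)]
    have hn1 : 1 ≤ n := by nlinarith [mul_self_nonneg s]
    by_cases h1 : (s + 1) * s < n
    · rw [if_pos h1, if_neg (by omega : ¬ s + 1 ≤ s)]
      obtain ⟨k, hk⟩ : ∃ k, n.toNat = k + 1 := ⟨n.toNat - 1, by omega⟩
      rw [hk]
      simp only [inferLoopA]
      rw [if_neg (not_lt.mpr hs2.le), if_neg (by nlinarith : ¬ s * s = n),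
        if_neg (by nlinarith : ¬ s * (s + 1) ≥ n)]
    · rw [if_neg h1, if_neg (by nlinarith : ¬ s * s = n),
        if_pos (by nlinarith : s * (s + 1) ≥ n)]
  · rw [if_neg h0, if_pos (le_antisymm hs1 (not_lt.mp h0))]
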